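-- pv_equiv track=rewrite | github.com/dmlgus1922/AlgorithmSolved | 백준/구현/백준 1308.py | get_days
-- ===== SOURCE A (Python) =====
-- def get_leap_year_info(this_year):
--     l_year_count = 0
--     for i in range(1, this_year):
--         if i % 400 == 0:
--             l_year_count += 1
--         elif i % 100 == 0:
--             continue
--         elif i % 4 == 0:
--             l_year_count += 1
--
--     if this_year % 400 == 0:
--         is_leap_year = True
--     elif this_year % 100 == 0:
--         is_leap_year = False
--     elif this_year % 4 == 0:
--         is_leap_year = True
--     else:
--         is_leap_year = False
--
--     return l_year_count, is_leap_year
--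
-- def get_days(y, m, d):
--     l_y_cnt, is_l_y = get_leap_year_info(y)
--
--     m_days = [0 for _ in range(m)]
--
--     for i in range(len(m_days)):
--         if i == 2 and is_l_y:
--             m_days[i] = 29
--         elif i == 2 and not is_l_y:
--             m_days[i] = 28
--         elif i in [1, 3, 5, 7, 8, 10, 12]:
--             m_days[i] = 31
--         else:
--             m_days[i] = 30
--
--
--     c_y_cnt = y - l_y_cnt - 1
--     days = c_y_cnt * 365 + l_y_cnt * 366 + sum(m_days[1:]) + (d - 1)
--
--     return days
-- ===== SOURCE B (Python) =====
-- # Closed-form leap-year count (O(1) in the year) plus a direct month-day sum,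
-- # instead of a year-by-year counting loop and a month-length list build.
--
-- _MONTHS_31 = {1, 3, 5, 7, 8, 10, 12}
--
-- def _leaps_before(y):
--     """Number of leap years in 1..y-1 (there are none before year 1)."""
--     n = max(y - 1, 0)
--     return n // 4 - n // 100 + n // 400
--
-- def get_days(y, m, d):
--     leaps = _leaps_before(y)
--     leap = y % 4 == 0 and (y % 100 != 0 or y % 400 == 0)
--     msum = 0
--     for i in range(1, m):
--         if i == 2:
--             msum += 29 if leap else 28
--         elif i in _MONTHS_31:
--             msum += 31
--         else:
--             msum += 30
--     return (y - leaps - 1) * 365 + leaps * 366 + msum + (d - 1)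
-- ===== Notes on version B (the rewrite author's own statement) =====
-- stated objective: faster
-- what changed: Replaces the O(y) year-by-year leap-counting loop with the closed-form floor-division count n//4-n//100+n//400 of leap years before y, and replaces building and slicing a month-length list with a direct running sum of month days.
import Mathlib
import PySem

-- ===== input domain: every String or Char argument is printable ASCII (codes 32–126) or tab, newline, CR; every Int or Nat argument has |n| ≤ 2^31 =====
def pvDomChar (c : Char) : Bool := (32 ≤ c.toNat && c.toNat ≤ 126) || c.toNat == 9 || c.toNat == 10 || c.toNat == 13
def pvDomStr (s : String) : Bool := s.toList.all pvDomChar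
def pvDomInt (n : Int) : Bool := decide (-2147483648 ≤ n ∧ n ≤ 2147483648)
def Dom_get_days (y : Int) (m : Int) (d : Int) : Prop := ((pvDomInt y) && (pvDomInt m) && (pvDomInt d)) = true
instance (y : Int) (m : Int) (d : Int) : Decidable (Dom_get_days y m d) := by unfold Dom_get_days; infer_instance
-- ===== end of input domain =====

-- B replaces A's O(y) leap-counting loop with closed-form floor-division arithmetic and A's
-- month-length list build with a direct running sum (objective: faster).

-- ===== PORT A =====
-- helper get_leap_year_info, transliterated
def get_leap_year_info (this_year : Int) : Int × Bool :=
  let l_year_count : Int :=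
    (PySem.List.pyRange 1 this_year 1).foldl
      (fun c i =>
        if PySem.Int.mod i 400 = 0 then c + 1
        else if PySem.Int.mod i 100 = 0 then c    -- 'continue'
        else if PySem.Int.mod i 4 = 0 then c + 1
        else c) 0
  let is_leap_year : Bool :=
    if PySem.Int.mod this_year 400 = 0 then true
    else if PySem.Int.mod this_year 100 = 0 then false
    else if PySem.Int.mod this_year 4 = 0 then true
    else false
  (l_year_count, is_leap_year)

def get_days (y : Int) (m : Int) (d : Int) : Int :=
  let info := get_leap_year_info y
  let l_y_cnt := info.1
  let is_l_y := info.2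
  let m_days0 : List Int := (PySem.List.pyRange 0 m 1).map (fun _ => 0)
  let m_days :=
    (PySem.List.pyRange 0 (PySem.List.len m_days0) 1).foldl
      (fun lst i =>
        PySem.List.pySetD lst i
          (if i = 2 ∧ is_l_y = true then 29
           else if i = 2 ∧ is_l_y = false then 28
           else if i ∈ ([1, 3, 5, 7, 8, 10, 12] : List Int) then 31
           else 30)) m_days0
  let c_y_cnt := y - l_y_cnt - 1
  c_y_cnt * 365 + l_y_cnt * 366 + (PySem.List.slice m_days (some 1) none).sum + (d - 1)

-- ===== PORT B =====
-- helper _leaps_before, transliterated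
def leaps_before (y : Int) : Int :=
  let n := max (y - 1) 0
  PySem.Int.floordiv n 4 - PySem.Int.floordiv n 100 + PySem.Int.floordiv n 400

def get_days_alt (y : Int) (m : Int) (d : Int) : Int :=
  let leaps := leaps_before y
  let leap : Bool :=
    decide (PySem.Int.mod y 4 = 0) &&
      (!decide (PySem.Int.mod y 100 = 0) || decide (PySem.Int.mod y 400 = 0))
  let msum : Int :=
    (PySem.List.pyRange 1 m 1).foldl
      (fun s i =>
        if i = 2 then s + (if leap = true then 29 else 28)
        else if i ∈ PySem.Set.ofList ([1, 3, 5, 7, 8, 10, 12] : List Int) then s + 31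
        else s + 30) 0
  (y - leaps - 1) * 365 + leaps * 366 + msum + (d - 1)

-- ===== PRECONDITION & SPEC =====
def Spec_get_days (y : Int) (m : Int) (d : Int) (out : Int) : Prop := out = get_days_alt y m d
instance (y : Int) (m : Int) (d : Int) (out : Int) : Decidable (Spec_get_days y m d out) := by unfold Spec_get_days; infer_instance

-- ===== CLAIM (what is proved, stated in full; the proofs are below) =====
def Claim_equal_get_days : Prop := ∀ (y : Int) (m : Int) (d : Int), Dom_get_days y m d → Spec_get_days y m d (get_days y m d)

-- ===== LEMMAS AND PROOFS =====

-- A's leap-year counting loop over range(1, 1+n) equals the closed form at n.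
lemma cntA_aux (n : Nat) :
    (PySem.List.pyRange 1 (1 + (n : Int)) 1).foldl
      (fun c i =>
        if PySem.Int.mod i 400 = 0 then c + 1
        else if PySem.Int.mod i 100 = 0 then c
        else if PySem.Int.mod i 4 = 0 then c + 1
        else c) 0
    = PySem.Int.floordiv (n : Int) 4 - PySem.Int.floordiv (n : Int) 100 +
        PySem.Int.floordiv (n : Int) 400 := by
  induction n with
  | zero => simp [PySem.List.pyRange_one_eq_nil]
  | succ k ih =>
    have h : (1 : Int) ≤ 1 + (k : Int) := by omega
    have hr : PySem.List.pyRange 1 (1 + ((k + 1 : Nat) : Int)) 1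
        = PySem.List.pyRange 1 (1 + (k : Int)) 1 ++ [1 + (k : Int)] := by
      push_cast
      rw [show (1 : Int) + ((k : Int) + 1) = (1 + (k : Int)) + 1 by ring]
      exact PySem.List.pyRange_one_succ_right h
    rw [hr, List.foldl_append, ih]
    simp only [List.foldl]
    rw [PySem.Int.mod_eq_emod_of_pos (by norm_num), PySem.Int.mod_eq_emod_of_pos (by norm_num),
        PySem.Int.mod_eq_emod_of_pos (by norm_num),
        PySem.Int.floordiv_eq_ediv_of_pos (by norm_num : (0:Int) < 4),
        PySem.Int.floordiv_eq_ediv_of_pos (by norm_num : (0:Int) < 100),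
        PySem.Int.floordiv_eq_ediv_of_pos (by norm_num : (0:Int) < 400),
        PySem.Int.floordiv_eq_ediv_of_pos (by norm_num : (0:Int) < 4),
        PySem.Int.floordiv_eq_ediv_of_pos (by norm_num : (0:Int) < 100),
        PySem.Int.floordiv_eq_ediv_of_pos (by norm_num : (0:Int) < 400)]
    push_cast
    split_ifs <;> omega

-- A's loop count equals B's helper for every y (empty range for y ≤ 1).
lemma cntA_eq (y : Int) :
    (PySem.List.pyRange 1 y 1).foldl
      (fun c i =>
        if PySem.Int.mod i 400 = 0 then c + 1
        else if PySem.Int.mod i 100 = 0 then c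
        else if PySem.Int.mod i 4 = 0 then c + 1
        else c) 0
    = leaps_before y := by
  unfold leaps_before
  by_cases hy : 1 ≤ y
  · have := cntA_aux (y - 1).toNat
    have hcast : (((y - 1).toNat : Int)) = y - 1 := by omega
    rw [hcast] at this
    rw [show (1 : Int) + (y - 1) = y by ring] at this
    rw [this, show max (y - 1) 0 = y - 1 by omega]
  · rw [PySem.List.pyRange_one_eq_nil (by omega), show max (y - 1) 0 = 0 by omega]
    simp

-- A's if/elif leap test equals B's boolean formula.
lemma leap_eq (y : Int) :
    (if PySem.Int.mod y 400 = 0 then true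
     else if PySem.Int.mod y 100 = 0 then false
     else if PySem.Int.mod y 4 = 0 then true
     else false)
    = (decide (PySem.Int.mod y 4 = 0) &&
        (!decide (PySem.Int.mod y 100 = 0) || decide (PySem.Int.mod y 400 = 0))) := by
  rw [PySem.Int.mod_eq_emod_of_pos (by norm_num), PySem.Int.mod_eq_emod_of_pos (by norm_num),
      PySem.Int.mod_eq_emod_of_pos (by norm_num)]
  by_cases h400 : y % 400 = 0 <;> by_cases h100 : y % 100 = 0 <;> by_cases h4 : y % 4 = 0 <;>
    simp [h400, h100, h4] <;> omega

-- writing g i at every index i of a list via the index loop yields the map.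
lemma setloop (g : Int → Int) :
    ∀ (n : Nat) (xs : List Int), n ≤ xs.length →
      (PySem.List.pyRange 0 (n : Int) 1).foldl
        (fun lst i => PySem.List.pySetD lst i (g i)) xs
      = (PySem.List.pyRange 0 (n : Int) 1).map g ++ xs.drop n := by
  intro n
  induction n with
  | zero => intro xs _; simp [PySem.List.pyRange_one_eq_nil]
  | succ k ih =>
    intro xs hlen
    have hr : PySem.List.pyRange 0 ((k + 1 : Nat) : Int) 1
        = PySem.List.pyRange 0 (k : Int) 1 ++ [(k : Int)] := by
      push_cast
      exact PySem.List.pyRange_one_succ_right (by omega)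
    rw [hr, List.foldl_append, ih xs (by omega), List.map_append]
    simp only [List.foldl, List.map]
    rw [PySem.List.pySetD_natCast]
    have hk : k < xs.length := by omega
    have hlen2 : k < ((PySem.List.pyRange 0 (k : Int) 1).map g ++ xs.drop k).length := by
      simp [PySem.List.length_pyRange_one]
      omega
    rw [List.set_eq_take_cons_drop _ hlen2]
    have hlenmap : ((PySem.List.pyRange 0 (k : Int) 1).map g).length = k := by
      simp [PySem.List.length_pyRange_one]
    rw [List.take_append_of_le_length (le_of_eq hlenmap.symm)]
    rw [List.take_of_length_le (le_of_eq hlenmap)]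
    rw [show k + 1 = ((PySem.List.pyRange 0 (k : Int) 1).map g).length + 1 by omega]
    rw [List.drop_append, List.drop_drop]
    simp [List.append_assoc]

-- the summed tail of A's month-length list is the month sum over range(1, m).
lemma mdaysA (g : Int → Int) (m : Int) :
    (PySem.List.slice
      ((PySem.List.pyRange 0
          (PySem.List.len ((PySem.List.pyRange 0 m 1).map (fun _ => (0 : Int)))) 1).foldl
        (fun lst i => PySem.List.pySetD lst i (g i))
        ((PySem.List.pyRange 0 m 1).map (fun _ => (0 : Int))))
      (some 1) none).sum
    = ((PySem.List.pyRange 1 m 1).map g).sum := by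
  have hlen : PySem.List.len ((PySem.List.pyRange 0 m 1).map (fun _ => (0 : Int)))
      = ((m.toNat : Nat) : Int) := by
    simp [PySem.List.length_pyRange_one]
  rw [hlen, setloop g m.toNat _ (by simp [PySem.List.length_pyRange_one])]
  rw [List.drop_of_length_le (by simp [PySem.List.length_pyRange_one]), List.append_nil]
  rw [PySem.List.slice_from_one]
  by_cases hm : m ≤ 0
  · rw [PySem.List.pyRange_one_eq_nil (by omega), PySem.List.pyRange_one_eq_nil (by omega)]
    simp
  · have h0 : ((m.toNat : Nat) : Int) = m := by omega
    rw [h0, PySem.List.pyRange_one_cons (by omega)]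
    simp

-- B's running-sum loop equals the sum of the mapped month lengths; the per-month values agree.
lemma msumB_eq (b : Bool) (m : Int) :
    (PySem.List.pyRange 1 m 1).foldl
      (fun s i =>
        if i = 2 then s + (if b = true then 29 else 28)
        else if i ∈ PySem.Set.ofList ([1, 3, 5, 7, 8, 10, 12] : List Int) then s + 31
        else s + 30) 0
    = ((PySem.List.pyRange 1 m 1).map
        (fun i =>
          if i = 2 ∧ b = true then 29
          else if i = 2 ∧ b = false then (28 : Int)
          else if i ∈ ([1, 3, 5, 7, 8, 10, 12] : List Int) then 31
          else 30)).sum := by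
  have hf : (fun (s i : Int) =>
      if i = 2 then s + (if b = true then 29 else 28)
      else if i ∈ PySem.Set.ofList ([1, 3, 5, 7, 8, 10, 12] : List Int) then s + 31
      else s + 30)
    = fun (s i : Int) => s +
      (if i = 2 ∧ b = true then 29
       else if i = 2 ∧ b = false then (28 : Int)
       else if i ∈ ([1, 3, 5, 7, 8, 10, 12] : List Int) then 31
       else 30) := by
    funext s i
    by_cases h2 : i = 2 <;> by_cases hm : i ∈ ([1, 3, 5, 7, 8, 10, 12] : List Int) <;>
      cases b <;> simp [h2, hm, PySem.Set.mem_ofList]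
  rw [hf, PySem.List.foldl_add]
  simp

-- ===== VERDICT (by name: the statement is the Claim_ definition above) =====
theorem get_days_spec : Claim_equal_get_days := by
  intro y m d _
  unfold Spec_get_days get_days get_days_alt get_leap_year_info
  simp only []
  rw [cntA_eq, leap_eq, mdaysA, msumB_eq]
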